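-- pv_equiv track=rewrite | github.com/rlostbet/RPG | RPG/ChatBot/phraseHandling.py | FindMatchingPhrases
-- ===== SOURCE A (Python) =====
-- def FindMatchingPhrases(words, phrases):
--     """find the matching phrase"""
--     matchingPhrase = None
--
--     # all the words in small cap
--     for i in range(len(words)):
--         words[i] = words[i].lower()
--
--     # split phrases word by word & small cap
--     for i in range(len(phrases)):
--         phrases[i] = [phraseWord.lower() for phraseWord in phrases[i].split()]
--
--     # compare
--     for phrase in phrases:
--         for j, word in enumerate(words):
--
--             if word == phrase[0]:
--                 candidateWords = words[j: j + len(phrase)]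
--
--                 if candidateWords == phrase:
--                     matchingPhrase = candidateWords
--
--     return matchingPhrase
-- ===== SOURCE B (Python) =====
-- def FindMatchingPhrases(words, phrases):
--     """find the matching phrase (last phrase, in phrase order, that occurs
--     as a contiguous run in words, case-insensitively).
--
--     Builds a hash index from each lowered word to its positions once, then
--     scans the phrases back-to-front and returns on the first hit, probing
--     only the positions of the phrase's first word.
--     Does not mutate its arguments (the original does)."""
--     ws = [w.lower() for w in words]
--     if not ws:
--         return None
--     pos = {}
--     for j, w in enumerate(ws):
--         pos.setdefault(w, []).append(j)
--     for phrase in reversed(phrases):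
--         p = [pw.lower() for pw in phrase.split()]
--         for j in pos.get(p[0], []):
--             if ws[j:j + len(p)] == p:
--                 return p
--     return None
-- ===== Notes on version B (the rewrite author's own statement) =====
-- stated objective: faster
-- what changed: B builds a hash index from each lowered word to its positions once, then scans the phrases back-to-front and returns on the first phrase that occurs (probing only the positions of its first word), instead of A's full forward scan over every phrase and every word position keeping the last match in an accumulator; B also does not mutate its arguments.
import Mathlib
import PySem

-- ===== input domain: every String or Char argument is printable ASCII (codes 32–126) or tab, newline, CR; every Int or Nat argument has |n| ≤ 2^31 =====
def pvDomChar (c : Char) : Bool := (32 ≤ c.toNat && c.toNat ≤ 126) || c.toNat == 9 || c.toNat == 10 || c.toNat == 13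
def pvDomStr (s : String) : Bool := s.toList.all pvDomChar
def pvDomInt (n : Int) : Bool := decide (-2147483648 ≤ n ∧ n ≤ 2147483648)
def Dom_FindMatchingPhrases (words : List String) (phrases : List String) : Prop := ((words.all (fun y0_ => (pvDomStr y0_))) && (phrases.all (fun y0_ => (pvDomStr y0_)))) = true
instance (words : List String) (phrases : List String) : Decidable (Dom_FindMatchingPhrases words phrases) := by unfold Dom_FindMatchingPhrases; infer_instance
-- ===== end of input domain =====

-- B scans phrases in reverse and returns the first occurring one (early exit) instead of
-- A's full forward scan keeping the last match; equivalence is about the RETURN value only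
-- (A lowercases `words` and rewrites `phrases` in place, B does not mutate its arguments).

-- ===== PORT A =====
-- one step of A's inner `for j, word in enumerate(words)` loop
def pvInnerStepA (ws phrase : List String) (acc : Option (List String)) (jw : Int × String) :
    Option (List String) :=
  match PySem.List.pyGet? phrase 0 with
  | none => acc      -- Python raises IndexError here; excluded by Pre_
  | some h =>
    if jw.2 = h then
      let cand := PySem.List.slice ws (some jw.1) (some (jw.1 + (phrase.length : Int)))
      if cand = phrase then some cand else acc
    else acc

def FindMatchingPhrases (words : List String) (phrases : List String) : Option (List String) :=
  let ws := words.map PySem.Str.lower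
  let ps := phrases.map (fun ph => (PySem.Str.split₀ ph).map PySem.Str.lower)
  ps.foldl (fun acc phrase =>
    (PySem.List.enumerate ws 0).foldl (pvInnerStepA ws phrase) acc) none

-- ===== PORT B =====
-- B's word→positions index: `for j, w in enumerate(ws): pos.setdefault(w, []).append(j)`
def pvIndexB (ws : List String) : PySem.Dict String (List Int) :=
  (PySem.List.enumerate ws 0).foldl
    (fun d jw => d.modify jw.2 [] (fun js => js ++ [jw.1])) PySem.Dict.empty

-- B's `for phrase in reversed(phrases): … return p` loop
def pvGoB (pos : PySem.Dict String (List Int)) (ws : List String) :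
    List String → Option (List String)
  | [] => none
  | ph :: rest =>
    let p := (PySem.Str.split₀ ph).map PySem.Str.lower
    match PySem.List.pyGet? p 0 with
    | none => none      -- Python raises IndexError here; excluded by Pre_
    | some first =>
      if (pos.getD first []).any
          (fun j => decide (PySem.List.slice ws (some j) (some (j + (p.length : Int))) = p))
      then some p else pvGoB pos ws rest

def FindMatchingPhrases_alt (words : List String) (phrases : List String) : Option (List String) :=
  let ws := words.map PySem.Str.lower
  if ws = [] then none
  else pvGoB (pvIndexB ws) ws phrases.reverse

-- ===== PRECONDITION & SPEC =====
-- Pre_ excludes exactly the inputs where A raises IndexError: a non-empty words list together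
-- with a phrase that splits into no words (empty or whitespace-only), where `phrase[0]` fails.
def Pre_FindMatchingPhrases (words : List String) (phrases : List String) : Prop :=
  words = [] ∨ ∀ ph ∈ phrases, PySem.Str.split₀ ph ≠ []
instance (words : List String) (phrases : List String) : Decidable (Pre_FindMatchingPhrases words phrases) := by unfold Pre_FindMatchingPhrases; infer_instance
def pvWitness_FindMatchingPhrases : List String × List String :=
  (["Hello", "my", "friend"], ["MY Friend", "nope"])

def Spec_FindMatchingPhrases (words : List String) (phrases : List String) (out : Option (List String)) : Prop := out = FindMatchingPhrases_alt words phrases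
instance (words : List String) (phrases : List String) (out : Option (List String)) : Decidable (Spec_FindMatchingPhrases words phrases out) := by unfold Spec_FindMatchingPhrases; infer_instance

-- ===== CLAIM (what is proved, stated in full; the proofs are below) =====
def Claim_equal_FindMatchingPhrases : Prop := ∀ (words : List String) (phrases : List String), Dom_FindMatchingPhrases words phrases → Pre_FindMatchingPhrases words phrases → Spec_FindMatchingPhrases words phrases (FindMatchingPhrases words phrases)

-- ===== LEMMAS AND PROOFS =====

-- pyGet? at 0 of a non-empty list is its head
lemma pvGet0 (p : List String) (hp : p ≠ []) :
    PySem.List.pyGet? p 0 = some (p.headI) := by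
  cases p with
  | nil => exact absurd rfl hp
  | cons x t => simp [PySem.List.pyGet?, PySem.List.pyIdx?]

-- A's inner loop over any index/word list: last match, written as an `if any`
lemma pvInner_eq (ws p : List String) (hp : p ≠ []) :
    ∀ (l : List (Int × String)) (acc : Option (List String)),
      l.foldl (pvInnerStepA ws p) acc =
      if l.any (fun jw => decide
          (PySem.List.slice ws (some jw.1) (some (jw.1 + (p.length : Int))) = p ∧ jw.2 = p.headI))
      then some p else acc := by
  intro l
  induction l with
  | nil => intro acc; simp
  | cons jw t ih =>
    intro acc
    simp only [List.foldl_cons, List.any_cons, ih]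
    by_cases hq : PySem.List.slice ws (some jw.1) (some (jw.1 + (p.length : Int))) = p ∧ jw.2 = p.headI
    · obtain ⟨h2, h1⟩ := hq
      simp [pvInnerStepA, pvGet0 p hp, h1, h2]
    · have hd : decide (PySem.List.slice ws (some jw.1) (some (jw.1 + (p.length : Int))) = p ∧ jw.2 = p.headI) = false := by
        simpa using hq
      have hstep : pvInnerStepA ws p acc jw = acc := by
        simp only [pvInnerStepA, pvGet0 p hp]
        split_ifs with ha hb
        · exact absurd ⟨hb, ha⟩ hq
        · rfl
        · rfl
      rw [hstep]
      simp only [hd, Bool.false_or]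

-- the index lists exactly the positions of each word
lemma pvPos_getD (ws : List String) (w : String) :
    (pvIndexB ws).getD w [] =
      (((PySem.List.enumerate ws 0).map Prod.swap).filter (fun q => q.1 == w)).map (·.2) := by
  unfold pvIndexB
  have h := PySem.Dict.getD_foldl_modify_append
    (l := (PySem.List.enumerate ws 0).map Prod.swap) (d := (PySem.Dict.empty : PySem.Dict String (List Int))) (c := w)
  rw [List.foldl_map] at h
  simpa [PySem.Dict.getD_empty] using h

lemma pvPos_mem (ws : List String) (w : String) (j : Int) :
    j ∈ (pvIndexB ws).getD w [] ↔ ∃ q ∈ PySem.List.enumerate ws 0, q.2 = w ∧ q.1 = j := by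
  rw [pvPos_getD]
  simp only [List.mem_map, List.mem_filter, beq_iff_eq]
  constructor
  · rintro ⟨q', ⟨⟨q, hq, rfl⟩, hw⟩, hj⟩
    exact ⟨q, hq, hw, hj⟩
  · rintro ⟨q, hq, hw, hj⟩
    exact ⟨Prod.swap q, ⟨⟨q, hq, rfl⟩, hw⟩, hj⟩

-- the `any` over enumerated words equals B's `any` over the indexed positions of the first word
lemma pvAny_eq (ws p : List String) :
    (PySem.List.enumerate ws 0).any (fun jw => decide
        (PySem.List.slice ws (some jw.1) (some (jw.1 + (p.length : Int))) = p ∧ jw.2 = p.headI))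
      = ((pvIndexB ws).getD p.headI []).any
          (fun j => decide (PySem.List.slice ws (some j) (some (j + (p.length : Int))) = p)) := by
  rw [Bool.eq_iff_iff]
  simp only [List.any_eq_true, decide_eq_true_eq]
  constructor
  · rintro ⟨jw, hmem, hs, hh⟩
    exact ⟨jw.1, (pvPos_mem ws p.headI jw.1).2 ⟨jw, hmem, hh, rfl⟩, hs⟩
  · rintro ⟨j, hj, hs⟩
    obtain ⟨q, hq, hw, rfl⟩ := (pvPos_mem ws p.headI j).1 hj
    exact ⟨q, hq, hs, hw⟩

-- A's outer loop over phrases (all non-empty after split) equals B's reversed early-exit scan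
lemma pvOuter_eq (ws : List String) :
    ∀ (l : List String), (∀ ph ∈ l, PySem.Str.split₀ ph ≠ []) →
      (l.map (fun ph => (PySem.Str.split₀ ph).map PySem.Str.lower)).foldl
        (fun acc phrase => (PySem.List.enumerate ws 0).foldl (pvInnerStepA ws phrase) acc) none
      = pvGoB (pvIndexB ws) ws l.reverse := by
  intro l
  induction l using List.reverseRecOn with
  | nil => intro _; simp [pvGoB]
  | append_singleton t x ih =>
    intro hall
    have hx : PySem.Str.split₀ x ≠ [] := hall x (by simp)
    have hpx : (PySem.Str.split₀ x).map PySem.Str.lower ≠ [] := by simpa using hx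
    rw [List.map_append, List.foldl_append, List.reverse_append]
    simp only [List.map_cons, List.map_nil, List.foldl_cons, List.foldl_nil,
      List.reverse_cons, List.reverse_nil, List.nil_append, List.singleton_append]
    rw [pvInner_eq ws _ hpx, pvAny_eq ws _,
      ih (fun ph hph => hall ph (by simp [hph]))]
    simp only [pvGoB, pvGet0 _ hpx]
-- ===== VERDICT (by name: the statement is the Claim_ definition above) =====
theorem FindMatchingPhrases_spec : Claim_equal_FindMatchingPhrases := by
  intro words phrases _ hpre
  unfold Spec_FindMatchingPhrases FindMatchingPhrases FindMatchingPhrases_alt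
  by_cases hw : words = []
  · subst hw
    simp [PySem.List.enumerate_nil, List.foldl_fixed]
  · have hws : words.map PySem.Str.lower ≠ [] := by simpa using hw
    rcases hpre with h | hall
    · exact absurd h hw
    · simp only [if_neg hws]
      exact pvOuter_eq (words.map PySem.Str.lower) phrases hall
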